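-- pv_equiv track=rewrite | github.com/joedanields/A-C-CS | streamlit_app.py | inclusion_exclusion
-- ===== SOURCE A (Python) =====
-- from itertools import combinations as it_combinations
--
-- def inclusion_exclusion(set_sizes: dict, intersections: dict) -> int:
--     """
--     set_sizes: {'A':a, 'B':b, ...}
--     intersections: keys as tuples sorted, e.g. ('A','B'): x, ('A','B','C'): y
--     """
--     labels = list(set(set_sizes.keys()))
--     total = 0
--
--     def inter_size(lbls_tuple):
--         key = tuple(sorted(lbls_tuple))
--         return intersections.get(key, 0)
--
--     for r in range(1, len(labels)+1):
--         sign = 1 if r % 2 == 1 else -1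
--         for subset in it_combinations(labels, r):
--             if r == 1:
--                 total += sign * set_sizes[subset[0]]
--             else:
--                 total += sign * inter_size(subset)
--     return total
-- ===== SOURCE B (Python) =====
-- def inclusion_exclusion(set_sizes: dict, intersections: dict) -> int:
--     total = sum(set_sizes.values())
--     for key, value in intersections.items():
--         n = len(key)
--         if n >= 2 and all(l in set_sizes for l in key) \
--                 and all(key[i] < key[i + 1] for i in range(n - 1)):
--             total += value if n % 2 == 1 else -value
--     return total
-- ===== Notes on version B (the rewrite author's own statement) =====
-- stated objective: faster
-- what changed: B replaces A's enumeration of all 2^n label subsets with a single pass: sum of set sizes plus one signed contribution per intersections entry whose key is a strictly sorted tuple of known labels, relying on inclusion-exclusion linearity.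
import Mathlib
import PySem

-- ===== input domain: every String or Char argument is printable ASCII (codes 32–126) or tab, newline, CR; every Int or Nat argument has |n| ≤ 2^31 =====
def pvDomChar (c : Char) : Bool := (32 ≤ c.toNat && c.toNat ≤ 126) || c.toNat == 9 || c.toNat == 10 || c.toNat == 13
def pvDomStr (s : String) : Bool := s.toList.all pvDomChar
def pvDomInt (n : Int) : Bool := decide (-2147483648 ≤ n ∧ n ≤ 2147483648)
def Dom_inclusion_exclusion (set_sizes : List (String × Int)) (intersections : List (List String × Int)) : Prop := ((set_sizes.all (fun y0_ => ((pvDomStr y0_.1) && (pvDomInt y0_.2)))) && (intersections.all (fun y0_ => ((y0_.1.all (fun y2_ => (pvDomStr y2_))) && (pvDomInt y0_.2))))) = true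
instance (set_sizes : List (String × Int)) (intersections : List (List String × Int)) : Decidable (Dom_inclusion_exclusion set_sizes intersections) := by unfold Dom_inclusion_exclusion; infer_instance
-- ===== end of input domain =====

-- B replaces A's enumeration of all 2^n label subsets by one signed pass over the intersections
-- entries themselves (objective: faster; a timing run measures the speed-up).

-- ===== PORT A =====
-- Literal port of A: labels = list(set(keys)); loop r = 1..len(labels); loop over combinations;
-- r = 1 reads set_sizes[subset[0]] (the key is always a label, i.e. a dict key, so Python's
-- KeyError branch is unreachable and .getD 0 is exact); r ≥ 2 reads intersections.get(sorted(subset), 0).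
-- The summed total is provably independent of the order of `labels`, so modelling list(set(...))
-- by first-insertion order (PySem.Set.ofList) is exact.
def inclusion_exclusion (set_sizes : List (String × Int)) (intersections : List (List String × Int)) : Int :=
  let sizes := PySem.Dict.ofList set_sizes
  let inters := PySem.Dict.ofList intersections
  let labels : List String := PySem.Set.ofList sizes.keys
  (PySem.List.pyRange 1 ((labels.length : Int) + 1)).foldl (fun total r =>
    let sign : Int := if PySem.Int.mod r 2 == 1 then 1 else -1
    (PySem.List.combinations labels r.toNat).foldl (fun total subset =>
      if r == 1 then
        total + sign * ((sizes.get? (subset.headD "")).getD 0)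
      else
        total + sign * (inters.getD (PySem.List.sorted subset (fun x => x)) 0)) total) 0

-- ===== PORT B =====
-- Port of B: total = sum of the size values; then one pass over intersections.items(), adding
-- ±value for each key that is a strictly increasing tuple (length ≥ 2) of known labels.
def inclusion_exclusion_alt (set_sizes : List (String × Int)) (intersections : List (List String × Int)) : Int :=
  let sizes := PySem.Dict.ofList set_sizes
  let inters := PySem.Dict.ofList intersections
  inters.items.foldl (fun total kv =>
    let key := kv.1
    let value := kv.2
    let n : Int := (key.length : Int)
    if decide (2 ≤ n) && key.all (fun l => sizes.contains l)
        && (PySem.List.pyRange 0 (n - 1)).all (fun i =>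
              decide (PySem.List.pyGetD key i "" < PySem.List.pyGetD key (i + 1) ""))
    then total + (if PySem.Int.mod n 2 == 1 then value else -value)
    else total) sizes.values.sum

-- ===== PRECONDITION & SPEC =====
def Spec_inclusion_exclusion (set_sizes : List (String × Int)) (intersections : List (List String × Int)) (out : Int) : Prop := out = inclusion_exclusion_alt set_sizes intersections
instance (set_sizes : List (String × Int)) (intersections : List (List String × Int)) (out : Int) : Decidable (Spec_inclusion_exclusion set_sizes intersections out) := by unfold Spec_inclusion_exclusion; infer_instance

-- ===== CLAIM (what is proved, stated in full; the proofs are below) =====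
def Claim_equal_inclusion_exclusion : Prop := ∀ (set_sizes : List (String × Int)) (intersections : List (List String × Int)), Dom_inclusion_exclusion set_sizes intersections → Spec_inclusion_exclusion set_sizes intersections (inclusion_exclusion set_sizes intersections)

-- ===== LEMMAS AND PROOFS =====

-- sum of a doubly-indexed family can be summed in either order
lemma sum_map_swap {α β : Type} (l : List α) (m : List β) (f : α → β → Int) :
    (l.map (fun x => (m.map (f x)).sum)).sum = (m.map (fun y => (l.map (fun x => f x y)).sum)).sum := by
  induction l with
  | nil => simp
  | cons a t ih =>
      simp only [List.map_cons, List.sum_cons, ih, ← PySem.List.sum_map_add_int]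

-- PySem.Set.ofList of a duplicate-free list is the list itself
lemma setOfList_of_nodup {α : Type} [BEq α] [LawfulBEq α] (xs : List α) (h : xs.Nodup) :
    PySem.Set.ofList xs = xs := by
  exact PySem.Set.ofList_eq_self_of_nodup xs h

-- a dict lookup with default 0 is the sum of the values at matching keys, when keys are unique
lemma getD_eq_sum (l : List (List String × Int)) (h : (l.map Prod.fst).Nodup) (k : List String) :
    (PySem.Dict.mk l).getD k 0 = (l.map (fun kv => if kv.1 = k then kv.2 else 0)).sum := by
  induction l with
  | nil => rfl
  | cons hd tl ih =>
      obtain ⟨hhd, htl⟩ := List.nodup_cons.mp h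
      rw [PySem.Dict.getD_eq_get?_getD, PySem.Dict.get?_mk_cons]
      by_cases hk : hd.1 = k
      · subst hk
        simp only [BEq.rfl, if_true, Option.getD_some, List.map_cons, List.sum_cons]
        have hz : tl.map (fun kv => if kv.1 = hd.1 then kv.2 else 0) = tl.map (fun _ => 0) := by
          apply List.map_congr_left
          intro kv hkv
          have : kv.1 ≠ hd.1 := fun e => hhd (e ▸ List.mem_map_of_mem hkv)
          simp [this]
        simp [hz]
      · have hbeq : (hd.1 == k) = false := beq_eq_false_iff_ne.mpr hk
        simp only [hbeq, List.map_cons, List.sum_cons, if_neg hk, zero_add]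
        rw [if_neg (by simp), ← PySem.Dict.getD_eq_get?_getD]
        exact ih htl

-- combinations of a duplicate-free list are pairwise distinct
lemma combinations_nodup {α : Type} (xs : List α) (h : xs.Nodup) (r : Nat) :
    (PySem.List.combinations xs r).Nodup := by
  induction xs generalizing r with
  | nil =>
      cases r with
      | zero => simp [PySem.List.combinations_zero]
      | succ r => simp [PySem.List.combinations_nil_succ]
  | cons x t ih =>
      obtain ⟨hx, ht⟩ := List.nodup_cons.mp h
      cases r with
      | zero => simp [PySem.List.combinations_zero]
      | succ r =>
          rw [PySem.List.combinations_cons_succ]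
          apply List.Nodup.append
          · exact List.Nodup.map (fun a b hab => by injection hab) (ih ht r)
          · exact ih ht (r + 1)
          · intro S hS1 hS2
            obtain ⟨c, _, rfl⟩ := List.mem_map.mp hS1
            have hsub := ((PySem.List.mem_combinations_iff t (r + 1) (x :: c)).mp hS2).1
            exact hx (hsub.subset List.mem_cons_self)

-- a sublist of a duplicate-free list is recovered by filtering on membership
lemma filter_mem_sublist {α : Type} [DecidableEq α] (S l : List α) (hs : S.Sublist l) (h : l.Nodup) :
    l.filter (fun x => decide (x ∈ S)) = S := by
  induction hs with
  | slnil => simp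
  | @cons S l a hs ih =>
      obtain ⟨ha, hl⟩ := List.nodup_cons.mp h
      have haS : a ∉ S := fun hmem => ha (hs.subset hmem)
      simp only [List.filter_cons, decide_eq_true_eq, if_neg haS]
      · exact ih hl
  | @cons₂ S l a hs ih =>
      obtain ⟨ha, hl⟩ := List.nodup_cons.mp h
      simp only [List.filter_cons, List.mem_cons, true_or, decide_true, if_pos]
      congr 1
      rw [List.filter_congr (l := l) (q := fun x => decide (x ∈ S)) ?_]
      · exact ih hl
      · intro x hx
        have : x ≠ a := fun e => ha (e ▸ hx)
        simp [this]

-- characterisation: a sublist of nodup `labels` sorts to `k` iff `k` is strictly increasing,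
-- made of labels, and the sublist is the filter of labels by membership in k
lemma sorted_eq_iff (labels k S : List String) (hnd : labels.Nodup) (hS : S.Sublist labels) :
    PySem.List.sorted S (fun x => x) = k ↔
      (k.Pairwise (· < ·) ∧ (∀ x ∈ k, x ∈ labels) ∧ S = labels.filter (fun x => decide (x ∈ k))) := by
  constructor
  · intro hsort
    have hperm : k.Perm S := by
      rw [← hsort]; exact PySem.List.sorted_perm S (fun x => x) false
    have hSnd : S.Nodup := List.Nodup.sublist hS hnd
    have hknd : k.Nodup := hperm.nodup_iff.mpr hSnd
    have hle : k.Pairwise (fun a b => a ≤ b) := by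
      rw [← hsort]; exact PySem.List.sorted_pairwise S (fun x => x)
    refine ⟨?_, ?_, ?_⟩
    · exact (hle.and hknd).imp (fun h => lt_of_le_of_ne h.1 h.2)
    · exact fun x hx => hS.subset (hperm.subset hx)
    · have h1 : labels.filter (fun x => decide (x ∈ S)) = S := filter_mem_sublist S labels hS hnd
      rw [← h1]
      apply List.filter_congr
      intro x _
      simp [hperm.mem_iff]
  · rintro ⟨hpw, hmem, rfl⟩
    have hknd : k.Nodup := hpw.imp ne_of_lt
    have hperm : k.Perm (labels.filter (fun x => decide (x ∈ k))) := by
      rw [List.perm_ext_iff_of_nodup hknd (List.Nodup.filter _ hnd)]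
      intro a
      simp only [List.mem_filter, decide_eq_true_eq]
      exact ⟨fun ha => ⟨hmem a ha, ha⟩, fun h => h.2⟩
    exact PySem.List.sorted_eq_of_perm_of_pairwise_lt _ k (fun x => x) hperm hpw

-- a single-point sum over a duplicate-free list
lemma sum_map_ite_eq {α : Type} [DecidableEq α] (l : List α) (hl : l.Nodup) (a : α) (v : α → Int) :
    (l.map (fun x => if x = a then v x else 0)).sum = if a ∈ l then v a else 0 := by
  induction l with
  | nil => simp
  | cons x t ih =>
      obtain ⟨hx, ht⟩ := List.nodup_cons.mp hl
      by_cases hxa : x = a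
      · subst hxa
        have hz : t.map (fun y => if y = x then v y else 0) = t.map (fun _ => 0) := by
          apply List.map_congr_left
          intro y hy
          have : y ≠ x := fun e => hx (e ▸ hy)
          simp [this]
        simp [hz]
      · have : a ≠ x := fun e => hxa e.symm
        simp [hxa, ih ht, this]

-- the subset sum at a fixed lookup key k collapses to at most one term
lemma sum_comb (labels k : List String) (hnd : labels.Nodup) (v : Int) (r : Nat) :
    ((PySem.List.combinations labels r).map
        (fun S => if PySem.List.sorted S (fun x => x) = k then v else 0)).sum
      = if k.Pairwise (· < ·) ∧ (∀ x ∈ k, x ∈ labels) ∧ k.length = r then v else 0 := by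
  by_cases hc : k.Pairwise (· < ·) ∧ (∀ x ∈ k, x ∈ labels) ∧ k.length = r
  · obtain ⟨h1, h2, h3⟩ := hc
    have hknd : k.Nodup := h1.imp ne_of_lt
    have hperm : k.Perm (labels.filter (fun x => decide (x ∈ k))) := by
      rw [List.perm_ext_iff_of_nodup hknd (List.Nodup.filter _ hnd)]
      intro a
      simp only [List.mem_filter, decide_eq_true_eq]
      exact ⟨fun ha => ⟨h2 a ha, ha⟩, fun h => h.2⟩
    have hmem : labels.filter (fun x => decide (x ∈ k)) ∈ PySem.List.combinations labels r :=
      (PySem.List.mem_combinations_iff labels r _).mpr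
        ⟨List.filter_sublist, by rw [← hperm.length_eq, h3]⟩
    have hrw : ∀ S ∈ PySem.List.combinations labels r,
        (if PySem.List.sorted S (fun x => x) = k then v else 0)
          = (if S = labels.filter (fun x => decide (x ∈ k)) then v else 0) := by
      intro S hSmem
      obtain ⟨hsub, _⟩ := (PySem.List.mem_combinations_iff labels r S).mp hSmem
      congr 1
      rw [sorted_eq_iff labels k S hnd hsub]
      exact propext ⟨fun h => h.2.2, fun h => ⟨h1, h2, h⟩⟩
    rw [List.map_congr_left hrw,
      sum_map_ite_eq _ (combinations_nodup labels hnd r) _ (fun _ => v)]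
    rw [if_pos hmem, if_pos ⟨h1, h2, h3⟩]
  · have hz : ∀ S ∈ PySem.List.combinations labels r,
        (if PySem.List.sorted S (fun x => x) = k then v else 0) = (fun _ => (0 : Int)) S := by
      intro S hSmem
      obtain ⟨hsub, hlen⟩ := (PySem.List.mem_combinations_iff labels r S).mp hSmem
      rw [if_neg]
      intro hsort
      obtain ⟨ha, hb, hfilt⟩ := (sorted_eq_iff labels k S hnd hsub).mp hsort
      have hperm : k.Perm S := by
        rw [← hsort]; exact PySem.List.sorted_perm S (fun x => x) false
      exact hc ⟨ha, hb, by rw [hperm.length_eq, hlen]⟩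
    rw [List.map_congr_left hz, if_neg hc]
    simp

-- B's adjacent-index test is exactly strict increasingness
lemma all_adjacent_iff_pairwise (key : List String) :
    ((PySem.List.pyRange 0 ((key.length : Int) - 1)).all (fun i =>
        decide (PySem.List.pyGetD key i "" < PySem.List.pyGetD key (i + 1) "")) = true)
      ↔ key.Pairwise (· < ·) := by
  have hmid : (∀ i : Int, i ∈ PySem.List.pyRange 0 ((key.length : Int) - 1) →
      decide (PySem.List.pyGetD key i "" < PySem.List.pyGetD key (i + 1) "") = true)
    ↔ ∀ (j : Nat) (_ : j + 1 < key.length), key[j] < key[j + 1] := by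
    constructor
    · intro h j hj
      have hmem : ((j : Nat) : Int) ∈ PySem.List.pyRange 0 ((key.length : Int) - 1) :=
        PySem.List.mem_pyRange_one.mpr ⟨by positivity, by omega⟩
      have h2 := h _ hmem
      rw [decide_eq_true_eq,
        PySem.List.pyGetD_eq_getElem key "" (by positivity) (by omega),
        PySem.List.pyGetD_eq_getElem key "" (by positivity) (by omega)] at h2
      have e1 : ((j : Nat) : Int).toNat = j := by omega
      have e2 : (((j : Nat) : Int) + 1).toNat = j + 1 := by omega
      simpa [e1, e2] using h2
    · intro h i hmem
      obtain ⟨h0, h1⟩ := PySem.List.mem_pyRange_one.mp hmem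
      rw [decide_eq_true_eq,
        PySem.List.pyGetD_eq_getElem key "" h0 (by omega),
        PySem.List.pyGetD_eq_getElem key "" (by omega) (by omega)]
      have e2 : (i + 1).toNat = i.toNat + 1 := by omega
      have := h i.toNat (by omega)
      simpa [e2] using this
  rw [List.all_eq_true]
  constructor
  · intro h
    rw [← List.isChain_iff_pairwise, List.isChain_iff_getElem]
    intro j hj
    exact hmid.mp h j hj
  · intro h
    rw [← List.isChain_iff_pairwise, List.isChain_iff_getElem] at h
    exact hmid.mpr h

-- the per-entry contribution of an intersections item in B, as a predicate on the input
def bterm (keys : List String) (kv : List String × Int) : Int :=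
  if kv.1.Pairwise (· < ·) ∧ (∀ x ∈ kv.1, x ∈ keys) ∧ 2 ≤ kv.1.length then
    (if kv.1.length % 2 == 1 then kv.2 else -kv.2)
  else 0

-- a loop 'if c: acc += f x else: acc += g x' with a test not depending on x is a mapped sum
lemma foldl_ite_add {α : Type} (l : List α) (c : Bool) (f g : α → Int) (t : Int) :
    l.foldl (fun acc x => if c then acc + f x else acc + g x) t
      = t + (l.map (fun x => if c then f x else g x)).sum := by
  cases c <;> simp [PySem.List.foldl_add]

-- a loop 'if c x: acc += f x' is a mapped sum of guarded terms
lemma foldl_ite_add' {α : Type} (l : List α) (c : α → Bool) (f : α → Int) (t : Int) :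
    l.foldl (fun acc x => if c x then acc + f x else acc) t
      = t + (l.map (fun x => if c x then f x else 0)).sum := by
  induction l generalizing t with
  | nil => simp
  | cons a l ih =>
      cases hc : c a <;> simp [hc, ih, add_assoc]

-- A's integer-mod parity sign versus B's natural-mod parity branch
lemma sign_cast (m : Nat) (v : Int) :
    (if PySem.Int.mod (m : Int) 2 == 1 then (1 : Int) else -1) * v
      = (if m % 2 == 1 then v else -v) := by
  have h : PySem.Int.mod (m : Int) 2 = ((m % 2 : Nat) : Int) := by
    exact_mod_cast PySem.Int.mod_natCast m 2
  rw [h]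
  rcases Nat.mod_two_eq_zero_or_one m with h2 | h2 <;> simp [h2]

-- summing A's signed collapsed term over r = 2 .. n yields B's per-entry contribution
lemma range_collapse (keys : List String) (kv : List String × Int) :
    ((PySem.List.pyRange 2 ((keys.length : Int) + 1)).map (fun r =>
        if kv.1.Pairwise (· < ·) ∧ (∀ x ∈ kv.1, x ∈ keys) ∧ kv.1.length = r.toNat
        then (if PySem.Int.mod r 2 == 1 then (1 : Int) else -1) * kv.2 else 0)).sum
      = bterm keys kv := by
  by_cases h12 : kv.1.Pairwise (· < ·) ∧ (∀ x ∈ kv.1, x ∈ keys)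
  · obtain ⟨h1, h2⟩ := h12
    have hlen : kv.1.length ≤ keys.length :=
      (List.Nodup.subperm (h1.imp ne_of_lt) h2).length_le
    have hrw : ∀ r ∈ PySem.List.pyRange 2 ((keys.length : Int) + 1),
        (if kv.1.Pairwise (· < ·) ∧ (∀ x ∈ kv.1, x ∈ keys) ∧ kv.1.length = r.toNat
          then (if PySem.Int.mod r 2 == 1 then (1 : Int) else -1) * kv.2 else 0)
        = (if r = (kv.1.length : Int)
            then (if PySem.Int.mod (kv.1.length : Int) 2 == 1 then (1 : Int) else -1) * kv.2
            else 0) := by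
      intro r hr
      obtain ⟨hr2, _⟩ := PySem.List.mem_pyRange_one.mp hr
      by_cases he : r = (kv.1.length : Int)
      · subst he
        rw [if_pos (show kv.1.Pairwise (· < ·) ∧ (∀ x ∈ kv.1, x ∈ keys) ∧
              kv.1.length = ((kv.1.length : Int)).toNat from ⟨h1, h2, by omega⟩),
            if_pos rfl]
      · rw [if_neg he, if_neg]
        rintro ⟨-, -, hl⟩
        exact he (by omega)
    rw [List.map_congr_left hrw,
      sum_map_ite_eq _ (PySem.List.nodup_pyRange_one _ _) _ _]
    by_cases h2le : 2 ≤ kv.1.length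
    · have hm : ((kv.1.length : Int)) ∈ PySem.List.pyRange 2 ((keys.length : Int) + 1) :=
        PySem.List.mem_pyRange_one.mpr ⟨by omega, by omega⟩
      have hb : bterm keys kv = (if kv.1.length % 2 == 1 then kv.2 else -kv.2) := by
        rw [bterm]; exact if_pos ⟨h1, h2, h2le⟩
      rw [if_pos hm, hb, sign_cast]
    · have hm : ((kv.1.length : Int)) ∉ PySem.List.pyRange 2 ((keys.length : Int) + 1) := by
        rw [PySem.List.mem_pyRange_one]
        omega
      have hb : bterm keys kv = 0 := by
        rw [bterm]; exact if_neg fun h => h2le h.2.2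
      rw [if_neg hm, hb]
  · have hz : ∀ r ∈ PySem.List.pyRange 2 ((keys.length : Int) + 1),
        (if kv.1.Pairwise (· < ·) ∧ (∀ x ∈ kv.1, x ∈ keys) ∧ kv.1.length = r.toNat
          then (if PySem.Int.mod r 2 == 1 then (1 : Int) else -1) * kv.2 else 0)
        = (fun _ => (0 : Int)) r := by
      intro r _
      exact if_neg fun h => h12 ⟨h.1, h.2.1⟩
    have hb : bterm keys kv = 0 := by
      rw [bterm]; exact if_neg fun h => h12 ⟨h.1, h.2.1⟩
    rw [List.map_congr_left hz, hb]
    simp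

lemma main_eq (s : List (String × Int)) (i : List (List String × Int)) :
    inclusion_exclusion s i = inclusion_exclusion_alt s i := by
  have hknd : (PySem.Dict.ofList s).keys.Nodup := PySem.Dict.nodup_keys_ofList s
  have hind' : ((PySem.Dict.ofList i).items.map Prod.fst).Nodup := PySem.Dict.nodup_keys_ofList i
  simp only [inclusion_exclusion, inclusion_exclusion_alt,
    setOfList_of_nodup _ hknd, foldl_ite_add, foldl_ite_add', PySem.List.foldl_add, zero_add]
  -- B side: each guarded item term is bterm
  rw [List.map_congr_left (l := (PySem.Dict.ofList i).items)
      (g := bterm (PySem.Dict.ofList s).keys) ?hB]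
  case hB =>
    intro kv _
    rw [bterm]
    by_cases hp : kv.1.Pairwise (· < ·) ∧ (∀ x ∈ kv.1, x ∈ (PySem.Dict.ofList s).keys)
        ∧ 2 ≤ kv.1.length
    · rw [if_pos hp, if_pos]
      · have h : PySem.Int.mod ((kv.1.length : Int)) 2 = ((kv.1.length % 2 : Nat) : Int) := by
          exact_mod_cast PySem.Int.mod_natCast kv.1.length 2
        rw [h]
        rcases Nat.mod_two_eq_zero_or_one kv.1.length with h2 | h2 <;> simp [h2]
      · rw [Bool.and_eq_true, Bool.and_eq_true]
        refine ⟨⟨?_, ?_⟩, ?_⟩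
        · exact decide_eq_true (by exact_mod_cast hp.2.2)
        · exact List.all_eq_true.mpr fun x hx =>
            (PySem.Dict.contains_iff_mem_keys _ x).mpr (hp.2.1 x hx)
        · exact (all_adjacent_iff_pairwise kv.1).mpr hp.1
    · rw [if_neg hp, if_neg]
      intro hb
      rw [Bool.and_eq_true, Bool.and_eq_true] at hb
      exact hp ⟨(all_adjacent_iff_pairwise kv.1).mp hb.2,
        fun x hx => (PySem.Dict.contains_iff_mem_keys _ x).mp (List.all_eq_true.mp hb.1.2 x hx),
        by exact_mod_cast of_decide_eq_true hb.1.1⟩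
  -- A side
  rw [PySem.Dict.values_eq_map_keys _ hknd (0 : Int)]
  by_cases hk : (PySem.Dict.ofList s).keys = []
  · have hitems : (PySem.Dict.ofList s).items = [] := by
      have h' : (PySem.Dict.ofList s).items.map Prod.fst = [] := by
        simpa [PySem.Dict.keys] using hk
      exact List.map_eq_nil_iff.mp h'
    rw [hk]
    rw [show ((([] : List String).length : Int) + 1) = 1 by simp,
      PySem.List.pyRange_one_eq_nil le_rfl]
    have hbz : ∀ kv ∈ (PySem.Dict.ofList i).items,
        bterm ([] : List String) kv = (fun _ => (0 : Int)) kv := by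
      intro kv _
      rw [bterm, if_neg]
      rintro ⟨-, hmem, h2⟩
      have hne : kv.1 ≠ [] := by
        intro hnil
        rw [hnil] at h2
        simp at h2
      obtain ⟨x, hx⟩ := List.exists_mem_of_ne_nil kv.1 hne
      exact absurd (hmem x hx) List.not_mem_nil
    rw [List.map_congr_left hbz]
    simp
  · have hpos : 0 < (PySem.Dict.ofList s).keys.length := List.length_pos_iff.mpr hk
    rw [PySem.List.pyRange_one_cons (by omega), List.map_cons, List.sum_cons]
    congr 1
    · -- the r = 1 term is the sum of the size values
      simp only [show ((1 : Int) == 1) = true from rfl, if_true,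
        show (PySem.Int.mod 1 2 == 1) = true from rfl,
        show ((1 : Int)).toNat = 1 from rfl, one_mul,
        PySem.List.combinations_one, List.map_map]
      apply congrArg
      apply List.map_congr_left
      intro x _
      simp only [Function.comp, List.headD_cons]
      rw [← PySem.Dict.getD_eq_get?_getD]
    · -- the r ≥ 2 terms collapse entrywise
      rw [List.map_congr_left (g := fun r => ((PySem.Dict.ofList i).items.map (fun kv =>
            if kv.1.Pairwise (· < ·) ∧ (∀ x ∈ kv.1, x ∈ (PySem.Dict.ofList s).keys)
                ∧ kv.1.length = r.toNat
            then (if PySem.Int.mod r 2 == 1 then (1 : Int) else -1) * kv.2 else 0)).sum) ?tail]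
      · rw [sum_map_swap]
        exact congrArg List.sum (List.map_congr_left
          (fun kv _ => range_collapse (PySem.Dict.ofList s).keys kv))
      case tail =>
        intro r hr
        obtain ⟨hr2, hrn⟩ := PySem.List.mem_pyRange_one.mp hr
        have hne : (r == 1) = false := beq_eq_false_iff_ne.mpr (by omega)
        simp only [hne, Bool.false_eq_true, if_false]
        have hgetD : ∀ k, (PySem.Dict.ofList i).getD k 0
            = ((PySem.Dict.ofList i).items.map (fun kv => if kv.1 = k then kv.2 else 0)).sum :=
          fun k => getD_eq_sum _ hind' k
        simp only [hgetD, ← List.sum_map_mul_left, mul_ite, mul_zero]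
        rw [sum_map_swap]
        apply congrArg
        apply List.map_congr_left
        intro kv _
        have hflip : ∀ S ∈ PySem.List.combinations (PySem.Dict.ofList s).keys r.toNat,
            (if kv.1 = PySem.List.sorted S (fun x => x)
              then (if PySem.Int.mod r 2 == 1 then (1 : Int) else -1) * kv.2 else 0)
            = (if PySem.List.sorted S (fun x => x) = kv.1
                then (if PySem.Int.mod r 2 == 1 then (1 : Int) else -1) * kv.2 else 0) := by
          intro S _
          congr 1
          exact propext ⟨Eq.symm, Eq.symm⟩
        rw [List.map_congr_left hflip, sum_comb _ _ hknd]
-- ===== VERDICT (by name: the statement is the Claim_ definition above) =====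
theorem inclusion_exclusion_spec : Claim_equal_inclusion_exclusion := by
  intro s i _
  unfold Spec_inclusion_exclusion
  exact main_eq s i
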